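-- pv_equiv track=rewrite | github.com/cwb14/synLTR | module2/ltrharvest_phasing.py | count_ltr_kmer_hits
-- ===== SOURCE A (Python) =====
-- from typing import Dict, List, Tuple, Optional
--
-- def revcomp(seq: str) -> str:
--     comp = str.maketrans("ACGTacgtNn", "TGCAtgcaNn")
--     return seq.translate(comp)[::-1]
--
-- def canonical_kmer(kmer: str) -> str:
--     rc = revcomp(kmer)
--     return rc if rc < kmer else kmer
--
-- def count_ltr_kmer_hits(seq: str, k: int, canonical: bool, subg_sets: Dict[int, set]) -> Dict[int, int]:
--     hits = {g: 0 for g in subg_sets.keys()}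
--     if len(seq) < k:
--         return hits
--     for i in range(0, len(seq) - k + 1):
--         kmer = seq[i:i+k]
--         if "N" in kmer:
--             continue
--         if canonical:
--             kmer = canonical_kmer(kmer)
--         for g, s in subg_sets.items():
--             if kmer in s:
--                 hits[g] += 1
--     return hits
-- ===== SOURCE B (Python) =====
-- def revcomp(seq: str) -> str:
--     comp = str.maketrans("ACGTacgtNn", "TGCAtgcaNn")
--     return seq.translate(comp)[::-1]
--
-- def canonical_kmer(kmer: str) -> str:
--     rc = revcomp(kmer)
--     return rc if rc < kmer else kmer
--
-- def count_ltr_kmer_hits(seq, k, canonical, subg_sets):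
--     # Three staged passes instead of A's nested scan of every group's set at
--     # every position: (1) one comprehension extracting the surviving
--     # (canonicalized) k-mers, (2) a multiplicity dict over them, (3) each
--     # group's count as the sum of multiplicities of its own set elements.
--     kmers = [canonical_kmer(seq[i:i+k]) if canonical else seq[i:i+k]
--              for i in range(0, len(seq) - k + 1) if "N" not in seq[i:i+k]]
--     cnt = {}
--     for km in kmers:
--         cnt[km] = cnt.get(km, 0) + 1
--     return {g: sum([cnt.get(m, 0) for m in s]) for g, s in subg_sets.items()}
-- ===== Notes on version B (the rewrite author's own statement) =====
-- stated objective: alternative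
-- what changed: B replaces A's per-position scan over every group's set by three staged passes: a comprehension collecting the surviving k-mers, a multiplicity dict over them, and per-group counts as sums of multiplicities over the group's own set elements (one dict lookup per set element instead of a set-membership test per group per position).
import Mathlib
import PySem

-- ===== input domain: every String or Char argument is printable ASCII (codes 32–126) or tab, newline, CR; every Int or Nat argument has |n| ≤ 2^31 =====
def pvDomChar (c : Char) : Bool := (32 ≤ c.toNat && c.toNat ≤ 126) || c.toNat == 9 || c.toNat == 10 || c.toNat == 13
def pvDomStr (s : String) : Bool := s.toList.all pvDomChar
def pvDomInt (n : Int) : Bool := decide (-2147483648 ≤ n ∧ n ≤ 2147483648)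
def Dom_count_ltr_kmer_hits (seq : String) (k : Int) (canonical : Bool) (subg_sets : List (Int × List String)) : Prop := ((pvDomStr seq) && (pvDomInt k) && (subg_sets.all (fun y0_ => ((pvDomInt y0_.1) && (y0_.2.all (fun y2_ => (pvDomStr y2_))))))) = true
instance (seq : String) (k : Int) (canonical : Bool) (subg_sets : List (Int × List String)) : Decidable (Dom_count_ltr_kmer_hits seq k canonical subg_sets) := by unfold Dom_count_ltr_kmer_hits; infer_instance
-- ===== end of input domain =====

-- B replaces A's per-position scan over every group's set by three staged passes:
-- collect the surviving k-mers, tally multiplicities in a dict, sum per group.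

-- ===== PORT A =====
-- str.maketrans("ACGTacgtNn", "TGCAtgcaNn") applied via translate: exact per-character map,
-- characters outside the table are unchanged ('N'→'N', 'n'→'n' are identities).
def pvTransChar (c : Char) : Char :=
  if c = 'A' then 'T' else if c = 'C' then 'G' else if c = 'G' then 'C' else if c = 'T' then 'A'
  else if c = 'a' then 't' else if c = 'c' then 'g' else if c = 'g' then 'c' else if c = 't' then 'a'
  else c

-- revcomp: translate then [::-1] (a full reverse)
def pvRevcomp (cs : List Char) : List Char := (cs.map pvTransChar).reverse

-- canonical_kmer: 'rc if rc < kmer else kmer'; Python's str '<' is code-point lexicographic = List Char '<'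
def pvCanon (cs : List Char) : List Char :=
  let rc := pvRevcomp cs
  if rc < cs then rc else cs

-- A's port. The dicts 'subg_sets' and 'hits' are association lists; Pre_ requires the
-- (Python-dict) keys to be distinct, so 'hits[g] += 1' is a map touching the entry with key g,
-- and the dict comprehension '{g: 0 for g in keys}' is a map over the items.
def count_ltr_kmer_hits (seq : String) (k : Int) (canonical : Bool) (subg_sets : List (Int × List String)) : List (Int × Int) :=
  let s := seq.toList
  let hits : List (Int × Int) := subg_sets.map (fun gs => (gs.1, 0))
  if (s.length : Int) < k then hits
  else
    (PySem.List.pyRange 0 ((s.length : Int) - k + 1) 1).foldl (fun hits i =>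
      let km := PySem.List.slice s (some i) (some (i + k))
      if PySem.Chars.isIn ['N'] km then hits       -- '"N" in kmer' then continue
      else
        let km := if canonical then pvCanon km else km
        subg_sets.foldl (fun hits gs =>
          if km ∈ gs.2.map String.toList then      -- 'kmer in s' (set membership)
            hits.map (fun p => if p.1 == gs.1 then (p.1, p.2 + 1) else p)  -- hits[g] += 1
          else hits) hits) hits

-- ===== PORT B =====
-- The list comprehension with its 'if' filter is a filterMap over the range;
-- 'cnt.get(km, 0) + 1' tallying is a fold inserting into a PySem.Dict;
-- 'sum([...])' is List.sum of a map.
def count_ltr_kmer_hits_alt (seq : String) (k : Int) (canonical : Bool) (subg_sets : List (Int × List String)) : List (Int × Int) :=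
  let s := seq.toList
  let kmers : List (List Char) :=
    (PySem.List.pyRange 0 ((s.length : Int) - k + 1) 1).filterMap (fun i =>
      let km := PySem.List.slice s (some i) (some (i + k))
      if PySem.Chars.isIn ['N'] km then none
      else some (if canonical then pvCanon km else km))
  let cnt : PySem.Dict (List Char) Int :=
    kmers.foldl (fun d x => d.insert x (d.getD x 0 + 1)) PySem.Dict.empty
  subg_sets.map (fun gs => (gs.1, (gs.2.map (fun m => cnt.getD m.toList 0)).sum))

-- ===== PRECONDITION & SPEC =====
-- Pre_ only rules out Lean-side encodings Python cannot produce: subg_sets is a Python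
-- Dict[int, set], so its keys and the elements of each value set are distinct.
def Pre_count_ltr_kmer_hits (seq : String) (k : Int) (canonical : Bool) (subg_sets : List (Int × List String)) : Prop :=
  (subg_sets.map Prod.fst).Nodup ∧ ∀ gs ∈ subg_sets, gs.2.Nodup
instance (seq : String) (k : Int) (canonical : Bool) (subg_sets : List (Int × List String)) : Decidable (Pre_count_ltr_kmer_hits seq k canonical subg_sets) := by unfold Pre_count_ltr_kmer_hits; infer_instance

def pvWitness_count_ltr_kmer_hits : String × Int × Bool × (List (Int × List String)) :=
  ("ACGTN", 2, true, [(1, ["AC", "GG"]), (2, [])])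

def Spec_count_ltr_kmer_hits (seq : String) (k : Int) (canonical : Bool) (subg_sets : List (Int × List String)) (out : List (Int × Int)) : Prop := out = count_ltr_kmer_hits_alt seq k canonical subg_sets
instance (seq : String) (k : Int) (canonical : Bool) (subg_sets : List (Int × List String)) (out : List (Int × Int)) : Decidable (Spec_count_ltr_kmer_hits seq k canonical subg_sets out) := by unfold Spec_count_ltr_kmer_hits; infer_instance

-- ===== CLAIM (what is proved, stated in full; the proofs are below) =====
def Claim_equal_count_ltr_kmer_hits : Prop := ∀ (seq : String) (k : Int) (canonical : Bool) (subg_sets : List (Int × List String)), Dom_count_ltr_kmer_hits seq k canonical subg_sets → Pre_count_ltr_kmer_hits seq k canonical subg_sets → Spec_count_ltr_kmer_hits seq k canonical subg_sets (count_ltr_kmer_hits seq k canonical subg_sets)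

-- ===== LEMMAS AND PROOFS =====

-- one pass of A's inner group loop over an arbitrary hits table: every entry whose key
-- matches a hit group is incremented
theorem pvStepFold (km : List Char) (l : List (Int × List String)) (h : List (Int × Int)) :
    l.foldl (fun h gs =>
        if km ∈ gs.2.map String.toList then
          h.map (fun p => if p.1 == gs.1 then (p.1, p.2 + 1) else p)
        else h) h
    = h.map (fun p => (p.1, p.2 + (l.countP (fun gs => decide (km ∈ gs.2.map String.toList) && gs.1 == p.1) : Int))) := by
  induction l generalizing h with
  | nil => simp
  | cons gs t ih =>
    simp only [List.foldl_cons]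
    by_cases hP : km ∈ gs.2.map String.toList
    · rw [if_pos hP, ih, List.map_map]
      apply List.map_congr_left
      intro p _
      simp only [Function.comp_apply, List.countP_cons, hP, decide_true, Bool.true_and]
      by_cases hk : p.1 = gs.1
      · simp only [hk, BEq.rfl, if_true]
        push_cast
        simp only [Prod.mk.injEq, true_and]
        omega
      · have h1 : (p.1 == gs.1) = false := by simp [hk]
        have h2 : (gs.1 == p.1) = false := by simp [Ne.symm hk]
        simp [h1, h2]
    · rw [if_neg hP, ih]
      apply List.map_congr_left
      intro p _
      have hd : (decide (km ∈ gs.2.map String.toList)) = false := by simpa using hP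
      simp only [List.countP_cons, hd, Bool.false_and, Bool.false_eq_true, if_false, add_zero]

-- with distinct keys, the per-entry increment of one pass is that entry's own membership test
theorem pvCountKey (q : (Int × List String) → Bool) (L : List (Int × List String))
    (hnd : (L.map Prod.fst).Nodup) (gs0 : Int × List String) (hmem : gs0 ∈ L) :
    L.countP (fun gs => q gs && gs.1 == gs0.1) = if q gs0 then 1 else 0 := by
  induction L with
  | nil => cases hmem
  | cons a t ih =>
    simp only [List.map_cons, List.nodup_cons] at hnd
    rcases List.mem_cons.mp hmem with rfl | hmem'
    · rw [List.countP_cons]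
      have ht : t.countP (fun gs => q gs && gs.1 == gs0.1) = 0 := by
        rw [List.countP_eq_zero]
        intro gs hgs hq
        have : gs.1 = gs0.1 := by
          have := (Bool.and_eq_true _ _).mp hq
          exact beq_iff_eq.mp this.2
        exact hnd.1 (this ▸ List.mem_map_of_mem hgs)
      rw [ht]
      by_cases hq : q gs0 = true <;> simp [hq]
    · have hne : (a.1 == gs0.1) = false := by
        apply beq_eq_false_iff_ne.mpr
        intro hkey
        exact hnd.1 (hkey ▸ List.mem_map_of_mem hmem')
      rw [List.countP_cons]
      simp only [hne, Bool.and_false]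
      exact ih hnd.2 hmem'

-- A's whole double loop: starting from any per-group table, it adds the number of kmers
-- hitting each group's set
theorem pvMainFold (L : List (Int × List String)) (hnd : (L.map Prod.fst).Nodup)
    (kms : List (List Char)) :
    ∀ (c : (Int × List String) → Int),
    kms.foldl (fun hits km => L.foldl (fun h gs =>
        if km ∈ gs.2.map String.toList then
          h.map (fun p => if p.1 == gs.1 then (p.1, p.2 + 1) else p)
        else h) hits)
      (L.map (fun gs => (gs.1, c gs)))
    = L.map (fun gs => (gs.1, c gs + (kms.countP (fun km => decide (km ∈ gs.2.map String.toList)) : Int))) := by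
  induction kms with
  | nil => intro c; simp
  | cons km kms ih =>
    intro c
    simp only [List.foldl_cons]
    rw [pvStepFold, List.map_map]
    have hinit : L.map ((fun p : Int × Int => (p.1, p.2 + (L.countP (fun gs => decide (km ∈ gs.2.map String.toList) && gs.1 == p.1) : Int))) ∘ (fun gs => (gs.1, c gs)))
        = L.map (fun gs => (gs.1, c gs + if km ∈ gs.2.map String.toList then 1 else 0)) := by
      apply List.map_congr_left
      intro gs hgs
      simp only [Function.comp_apply]
      rw [pvCountKey _ L hnd gs hgs]
      split_ifs <;> simp_all
    rw [hinit, ih]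
    apply List.map_congr_left
    intro gs _
    by_cases hm : km ∈ gs.2.map String.toList
    · simp only [List.countP_cons, hm, decide_true, if_pos hm]
      push_cast
      simp only [Prod.mk.injEq, true_and]
      omega
    · have hd : (decide (km ∈ gs.2.map String.toList)) = false := by simpa using hm
      simp only [List.countP_cons, hd, Bool.false_eq_true, if_false, if_neg hm, add_zero]

-- a 0/1 indicator summed over a duplicate-free list is a membership test
theorem pvIndicator (km : List Char) (s : List (List Char)) (hnd : s.Nodup) :
    (s.map (fun m => if km == m then (1 : Int) else 0)).sum = if km ∈ s then 1 else 0 := by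
  induction s with
  | nil => simp
  | cons a t ih =>
    rw [List.nodup_cons] at hnd
    simp only [List.map_cons, List.sum_cons]
    by_cases ha : km = a
    · subst ha
      have ht : t.map (fun m => if km == m then (1 : Int) else 0) = t.map (fun _ => (0 : Int)) :=
        List.map_congr_left (fun m hm => by
          have : (km == m) = false := beq_eq_false_iff_ne.mpr (fun h => hnd.1 (h ▸ hm))
          simp [this])
      rw [ht]
      simp
    · have hb : (km == a) = false := beq_eq_false_iff_ne.mpr ha
      rw [hb]
      simp only [Bool.false_eq_true, if_false, zero_add]
      rw [ih hnd.2]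
      simp [List.mem_cons, ha]

-- B's per-group sum of multiplicities over a duplicate-free set is the number of kmers
-- that are members of the set
theorem pvSumCount (s : List (List Char)) (hnd : s.Nodup) (kms : List (List Char)) :
    (s.map (fun m => (kms.count m : Int))).sum = (kms.countP (fun km => decide (km ∈ s)) : Int) := by
  induction kms with
  | nil => simp
  | cons km kms ih =>
    rw [List.countP_cons]
    have h1 : (s.map (fun m => (((km :: kms).count m : Nat) : Int))).sum
        = (s.map (fun m => ((kms.count m : Int) + if km == m then (1 : Int) else 0))).sum := by
      apply congrArg
      apply List.map_congr_left
      intro m _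
      rw [List.count_cons]
      push_cast
      rfl
    rw [h1, PySem.List.sum_map_add_int, ih, pvIndicator km s hnd]
    push_cast
    by_cases hmem : km ∈ s <;> simp [hmem]

-- A's position loop with its 'continue' is the fold of the surviving transformed kmers
theorem pvSkipFold {α β : Type} (cond : Int → Bool) (g : Int → α) (F : β → α → β)
    (l : List Int) (h : β) :
    l.foldl (fun acc i => if cond i then acc else F acc (g i)) h
    = ((l.filter (fun i => !cond i)).map g).foldl F h := by
  induction l generalizing h with
  | nil => rfl
  | cons i t ih =>
    by_cases hc : cond i <;> simp [hc, ih]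

-- B's comprehension (a filterMap) yields exactly those surviving transformed kmers
theorem pvFilterMapSkip {α : Type} (cond : Int → Bool) (g : Int → α) (l : List Int) :
    l.filterMap (fun i => if cond i then none else some (g i))
    = (l.filter (fun i => !cond i)).map g := by
  induction l with
  | nil => rfl
  | cons i t ih =>
    by_cases hc : cond i <;> simp [hc, ih]

-- ===== VERDICT (by name: the statement is the Claim_ definition above) =====
theorem count_ltr_kmer_hits_spec : Claim_equal_count_ltr_kmer_hits := by
  intro seq k canonical subg_sets _ hpre
  obtain ⟨hkeys, hsets⟩ := hpre
  unfold Spec_count_ltr_kmer_hits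
  simp only [count_ltr_kmer_hits, count_ltr_kmer_hits_alt]
  rw [pvFilterMapSkip
    (cond := fun i : Int => PySem.Chars.isIn ['N'] (PySem.List.slice seq.toList (some i) (some (i + k))))
    (g := fun i : Int => if canonical then pvCanon (PySem.List.slice seq.toList (some i) (some (i + k)))
                   else PySem.List.slice seq.toList (some i) (some (i + k)))]
  have hgetD : ∀ m : String,
      ((((PySem.List.pyRange 0 ((seq.toList.length : Int) - k + 1) 1).filter
          (fun i => !PySem.Chars.isIn ['N'] (PySem.List.slice seq.toList (some i) (some (i + k))))).map
          (fun i => if canonical then pvCanon (PySem.List.slice seq.toList (some i) (some (i + k)))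
                    else PySem.List.slice seq.toList (some i) (some (i + k)))).foldl
          (fun d x => d.insert x (d.getD x 0 + 1)) PySem.Dict.empty).getD m.toList 0
      = ((((PySem.List.pyRange 0 ((seq.toList.length : Int) - k + 1) 1).filter
          (fun i => !PySem.Chars.isIn ['N'] (PySem.List.slice seq.toList (some i) (some (i + k))))).map
          (fun i => if canonical then pvCanon (PySem.List.slice seq.toList (some i) (some (i + k)))
                    else PySem.List.slice seq.toList (some i) (some (i + k)))).count m.toList : Int) := by
    intro m
    rw [PySem.Dict.getD_foldl_insert_add_one, PySem.Dict.getD_empty, zero_add]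
  by_cases hlt : ((seq.toList.length : Int) < k)
  · rw [if_pos hlt]
    have hnil : PySem.List.pyRange 0 ((seq.toList.length : Int) - k + 1) 1 = [] :=
      PySem.List.pyRange_one_eq_nil (by omega)
    rw [hnil]
    simp [PySem.Dict.getD_empty, PySem.List.sum_map_const_int]
  · rw [if_neg hlt]
    rw [pvSkipFold
      (cond := fun i : Int => PySem.Chars.isIn ['N'] (PySem.List.slice seq.toList (some i) (some (i + k))))
      (g := fun i : Int => if canonical then pvCanon (PySem.List.slice seq.toList (some i) (some (i + k)))
                     else PySem.List.slice seq.toList (some i) (some (i + k)))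
      (F := fun (hits : List (Int × Int)) (km : List Char) => subg_sets.foldl (fun (h : List (Int × Int)) (gs : Int × List String) =>
              if km ∈ gs.2.map String.toList then
                h.map (fun p => if p.1 == gs.1 then (p.1, p.2 + 1) else p)
              else h) hits)]
    rw [pvMainFold subg_sets hkeys _ (fun _ => 0)]
    apply List.map_congr_left
    intro gs hgs
    rw [List.map_congr_left (fun m _ => hgetD m)]
    have hcomp : gs.2.map (fun m : String =>
        ((((PySem.List.pyRange 0 ((seq.toList.length : Int) - k + 1) 1).filter
            (fun i => !PySem.Chars.isIn ['N'] (PySem.List.slice seq.toList (some i) (some (i + k))))).map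
            (fun i => if canonical then pvCanon (PySem.List.slice seq.toList (some i) (some (i + k)))
                      else PySem.List.slice seq.toList (some i) (some (i + k)))).count m.toList : Int))
        = (gs.2.map String.toList).map (fun t : List Char =>
        ((((PySem.List.pyRange 0 ((seq.toList.length : Int) - k + 1) 1).filter
            (fun i => !PySem.Chars.isIn ['N'] (PySem.List.slice seq.toList (some i) (some (i + k))))).map
            (fun i => if canonical then pvCanon (PySem.List.slice seq.toList (some i) (some (i + k)))
                      else PySem.List.slice seq.toList (some i) (some (i + k)))).count t : Int)) := by
      rw [List.map_map]
      rfl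
    have hnd2 : (gs.2.map String.toList).Nodup :=
      (hsets gs hgs).map (fun a b h => by have := congrArg String.ofList h; simpa using this)
    rw [hcomp, pvSumCount (gs.2.map String.toList) hnd2]
    simp [zero_add]
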